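-- pv_equiv track=rewrite | github.com/monologg/KoBigBird | pretrain/create_pretraining_data.py | _wordpieces_to_grams
-- ===== SOURCE A (Python) =====
-- import collections
--
-- _Gram = collections.namedtuple("_Gram", ["begin", "end"])
--
-- def _wordpieces_to_grams(tokens, special_tokens):
--     """Reconstitue grams (words) from `tokens`.
--     E.g.,
--        tokens: ['[CLS]', 'That', 'lit', '##tle', 'blue', 'tru', '##ck', '[SEP]']
--         grams: [          [1,2), [2,         4),  [4,5) , [5,       6)]
--     Args:
--       tokens: list of wordpieces
--     Returns:
--       List of _Grams representing spans of whole words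
--       (without "[CLS]" and "[SEP]").
--     """
--     grams = []
--     gram_start_pos = None
--     for i, token in enumerate(tokens):
--         if gram_start_pos is not None and token.startswith("##"):
--             continue
--         if gram_start_pos is not None:
--             grams.append(_Gram(gram_start_pos, i))
--         if token not in special_tokens:
--             gram_start_pos = i
--         else:
--             gram_start_pos = None
--     if gram_start_pos is not None:
--         grams.append(_Gram(gram_start_pos, len(tokens)))
--     return grams
-- ===== SOURCE B (Python) =====
-- import collections
--
-- _Gram = collections.namedtuple("_Gram", ["begin", "end"])
--
-- def _wordpieces_to_grams(tokens, special_tokens):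
--     n = len(tokens)
--     special = set(special_tokens)
--     # pass 1: which positions begin a whole word (local predicate via a scanned 'open' flag)
--     is_start = []
--     open_ = False
--     for t in tokens:
--         cont = open_ and t.startswith("##")
--         is_start.append(not cont and t not in special)
--         open_ = cont or t not in special
--     # pass 2: back-to-front, nxt[i] = smallest j > i whose token does not start with '##' (else n)
--     nxt = [0] * n
--     b = n
--     for i in range(n - 1, -1, -1):
--         nxt[i] = b
--         if not tokens[i].startswith("##"):
--             b = i
--     # pass 3: emit a gram per start, closed at the next non-'##' boundary
--     return [_Gram(s, nxt[s]) for s in range(n) if is_start[s]]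
-- ===== Notes on version B (the rewrite author's own statement) =====
-- stated objective: faster
-- what changed: Replaced A's stateful single loop (optional open-gram start carried across iterations, with a list-membership scan per token) by three independent passes over the tokens — a scan marking word-start positions using a set of special tokens built once, a back-to-front pass computing each position's next non-'##' boundary, and an emission pass pairing starts with boundaries.
import Mathlib
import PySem

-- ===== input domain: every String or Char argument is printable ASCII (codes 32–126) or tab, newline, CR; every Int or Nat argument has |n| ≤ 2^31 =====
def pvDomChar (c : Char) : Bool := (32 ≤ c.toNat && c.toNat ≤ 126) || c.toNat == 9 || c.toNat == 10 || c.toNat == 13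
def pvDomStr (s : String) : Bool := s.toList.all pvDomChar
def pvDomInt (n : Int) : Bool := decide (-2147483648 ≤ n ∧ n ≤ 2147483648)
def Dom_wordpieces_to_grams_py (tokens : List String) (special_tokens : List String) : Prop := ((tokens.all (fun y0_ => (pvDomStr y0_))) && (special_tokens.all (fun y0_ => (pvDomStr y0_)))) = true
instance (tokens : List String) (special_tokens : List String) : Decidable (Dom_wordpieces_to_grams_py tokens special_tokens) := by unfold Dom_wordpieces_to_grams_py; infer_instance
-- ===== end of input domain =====

-- B replaces A's stateful single loop by three passes (start-marking scan with a special-token set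
-- built once, back-to-front next non-'##' boundary pass, emission pass); measured faster at large sizes.


-- ===== PORT A =====
-- loop of A: state = (accumulated grams, optional open-gram start); i is the running index
def pvGoA (special_tokens : List String) : List String → Int → Option Int → List (Int × Int) → List (Int × Int)
  | [], i, gsp, grams =>
      match gsp with
      | some g => grams ++ [(g, i)]
      | none => grams
  | t :: rest, i, gsp, grams =>
      if gsp.isSome && PySem.Str.startswith t "##" then
        pvGoA special_tokens rest (i + 1) gsp grams
      else
        let grams := match gsp with
          | some g => grams ++ [(g, i)]
          | none => grams
        if t ∈ special_tokens then pvGoA special_tokens rest (i + 1) none grams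
        else pvGoA special_tokens rest (i + 1) (some i) grams

def wordpieces_to_grams_py (tokens : List String) (special_tokens : List String) : List (Int × Int) :=
  pvGoA special_tokens tokens 0 none []

-- ===== PORT B =====
-- pass 1 of B: the list of is_start booleans, scanning the 'open_' flag
def pvStarts (special : PySem.Set String) : List String → Bool → List Bool
  | [], _ => []
  | t :: rest, op =>
      let cont := op && PySem.Str.startswith t "##"
      (!cont && !(decide (t ∈ special))) ::
        pvStarts special rest (cont || !(decide (t ∈ special)))

-- pass 2 of B, back-to-front: returns (nxt list for the suffix starting at index i, first index ≥ i
-- whose token does not start with '##', or the index one past the end)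
def pvNxt : List String → Int → List Int × Int
  | [], i => ([], i)
  | t :: rest, i =>
      let (ns, b) := pvNxt rest (i + 1)
      (b :: ns, if PySem.Str.startswith t "##" then b else i)

-- pass 3 of B: emit (s, nxt[s]) for each start position
def pvEmit : List Bool → List Int → Int → List (Int × Int)
  | st :: sts, e :: es, i =>
      (if st then [(i, e)] else []) ++ pvEmit sts es (i + 1)
  | _, _, _ => []

def wordpieces_to_grams_py_alt (tokens : List String) (special_tokens : List String) : List (Int × Int) :=
  pvEmit (pvStarts (PySem.Set.ofList special_tokens) tokens false) (pvNxt tokens 0).1 0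

-- ===== PRECONDITION & SPEC =====
def Spec_wordpieces_to_grams_py (tokens : List String) (special_tokens : List String) (out : List (Int × Int)) : Prop := out = wordpieces_to_grams_py_alt tokens special_tokens
instance (tokens : List String) (special_tokens : List String) (out : List (Int × Int)) : Decidable (Spec_wordpieces_to_grams_py tokens special_tokens out) := by unfold Spec_wordpieces_to_grams_py; infer_instance

-- ===== CLAIM (what is proved, stated in full; the proofs are below) =====
def Claim_equal_wordpieces_to_grams_py : Prop := ∀ (tokens : List String) (special_tokens : List String), Dom_wordpieces_to_grams_py tokens special_tokens → Spec_wordpieces_to_grams_py tokens special_tokens (wordpieces_to_grams_py tokens special_tokens)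

-- ===== LEMMAS AND PROOFS =====


-- main invariant: for any suffix, A's loop equals B's three passes, both for a closed state
-- (gsp = none / op = false) and for an open gram started at g (gsp = some g / op = true),
-- where the open gram closes at (pvNxt ts i).2, the first non-'##' position.
theorem pvGoA_eq (spec : List String) (ts : List String) :
    ∀ (i : Int) (acc : List (Int × Int)),
      (pvGoA spec ts i none acc = acc ++ pvEmit (pvStarts (PySem.Set.ofList spec) ts false) (pvNxt ts i).1 i) ∧
      (∀ g, pvGoA spec ts i (some g) acc =
        acc ++ (g, (pvNxt ts i).2) :: pvEmit (pvStarts (PySem.Set.ofList spec) ts true) (pvNxt ts i).1 i) := by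
  induction ts with
  | nil => intro i acc; simp [pvGoA, pvStarts, pvNxt, pvEmit]
  | cons t rest ih =>
    intro i acc
    constructor
    · by_cases hs : t ∈ spec
      · simp [pvGoA, pvStarts, pvNxt, pvEmit, PySem.Set.mem_ofList, hs, (ih (i+1) acc).1]
      · simp [pvGoA, pvStarts, pvNxt, pvEmit, PySem.Set.mem_ofList, hs, (ih (i+1) acc).2 i]
    · intro g
      by_cases hh : PySem.Chars.startswith t.toList ['#', '#'] = true
      · simp [pvGoA, pvStarts, pvNxt, pvEmit, PySem.Set.mem_ofList, hh, (ih (i+1) acc).2 g]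
      · by_cases hs : t ∈ spec
        · simp [pvGoA, pvStarts, pvNxt, pvEmit, PySem.Set.mem_ofList, hh, hs, (ih (i+1) (acc ++ [(g,i)])).1]
        · simp [pvGoA, pvStarts, pvNxt, pvEmit, PySem.Set.mem_ofList, hh, hs, (ih (i+1) (acc ++ [(g,i)])).2 i]

-- ===== VERDICT (by name: the statement is the Claim_ definition above) =====
theorem wordpieces_to_grams_py_spec : Claim_equal_wordpieces_to_grams_py := by
  intro tokens special_tokens _
  unfold Spec_wordpieces_to_grams_py wordpieces_to_grams_py wordpieces_to_grams_py_alt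
  simpa using (pvGoA_eq special_tokens tokens 0 []).1
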